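-- pv_equiv track=rewrite | github.com/Andy123qq4/carpark_monitor | dedup.py | normalize_plate
-- ===== SOURCE A (Python) =====
-- def normalize_plate(text: str) -> str:
--     """Apply position-aware correction for HK plate format [A-Z]{1,2}[0-9]{1,4}.
--
--     At letter positions (0–1): correct digit lookalikes → letters (e.g. 8→B, 0→O).
--     At digit positions (2+): correct letter lookalikes → digits (e.g. B→8, O→0).
--     """
--     text = text.replace(' ', '').upper()
--     if not text:
--         return text
--
--     DIGIT_TO_LETTER = {'0': 'O', '1': 'I', '2': 'Z', '4': 'A', '5': 'S', '6': 'G', '8': 'B'}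
--     LETTER_TO_DIGIT = {'O': '0', 'I': '1', 'Z': '2', 'A': '4', 'S': '5', 'G': '6', 'B': '8'}
--
--     # Detect letter/digit boundary: find first pure digit char at index >= 1
--     # (skip index 0 — HK plates always start with at least one letter, even if OCR misread it)
--     split = len(text)
--     for i, c in enumerate(text):
--         if c.isdigit() and i >= 1:
--             split = i
--             break
--     # If no pure digit found, check for letter-in-digit-position lookalikes
--     if split == len(text):
--         for i, c in enumerate(text):
--             if c in LETTER_TO_DIGIT and i >= 1:
--                 split = i
--                 break
--     # Clamp to valid HK prefix range [1, 2]
--     split = max(1, min(2, split))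
--
--     result = []
--     for i, c in enumerate(text):
--         if i < split:
--             result.append(DIGIT_TO_LETTER.get(c, c))
--         else:
--             result.append(LETTER_TO_DIGIT.get(c, c))
--     return ''.join(result)
-- ===== SOURCE B (Python) =====
-- def normalize_plate(text: str) -> str:
--     """Position-aware OCR correction for HK plates as a per-position closed form:
--     since the split point is always clamped to {1,2}, position 0 is always a letter
--     position and positions >= 2 are always digit positions; only position 1's
--     treatment has to be decided, and the only observable effect there is a
--     letter-lookalike -> digit substitution when no real digit follows.
--     No boundary search or split variable is needed."""
--     text = text.replace(' ', '').upper()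
--     if not text:
--         return text
--
--     DIGIT_TO_LETTER = {'0': 'O', '1': 'I', '2': 'Z', '4': 'A', '5': 'S', '6': 'G', '8': 'B'}
--     LETTER_TO_DIGIT = {'O': '0', 'I': '1', 'Z': '2', 'A': '4', 'S': '5', 'G': '6', 'B': '8'}
--
--     head = DIGIT_TO_LETTER.get(text[0], text[0])
--     if len(text) == 1:
--         return head
--     c1 = text[1]
--     if c1 in LETTER_TO_DIGIT and not any(c.isdigit() for c in text[2:]):
--         mid = LETTER_TO_DIGIT[c1]
--     else:
--         mid = c1
--     tail = ''.join(LETTER_TO_DIGIT.get(c, c) for c in text[2:])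
--     return head + mid + tail
-- ===== Notes on version B (the rewrite author's own statement) =====
-- stated objective: simpler
-- what changed: B eliminates the boundary search entirely: since A's split is always clamped to {1,2}, B computes each position directly - position 0 always via DIGIT_TO_LETTER, positions >= 2 always via LETTER_TO_DIGIT, and position 1 is changed only in the single observable case (a letter lookalike with no real digit after it); no split variable, no scanning loops, no clamp.
import Mathlib
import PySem

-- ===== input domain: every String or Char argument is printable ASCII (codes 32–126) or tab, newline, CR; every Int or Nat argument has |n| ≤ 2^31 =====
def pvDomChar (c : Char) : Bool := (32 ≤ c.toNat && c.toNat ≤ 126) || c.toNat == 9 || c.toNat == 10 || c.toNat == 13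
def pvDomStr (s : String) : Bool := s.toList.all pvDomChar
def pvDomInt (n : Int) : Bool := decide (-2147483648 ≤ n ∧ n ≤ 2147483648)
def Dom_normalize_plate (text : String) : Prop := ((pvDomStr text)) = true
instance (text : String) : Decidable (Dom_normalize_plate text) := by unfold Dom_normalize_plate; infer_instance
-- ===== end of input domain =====

-- B removes A's boundary search altogether: the clamped split is always in {1,2}, so B maps
-- each position by a closed per-position rule (only position 1 needs one boolean) — simpler.

-- shared dict literals (both Pythons define the same two tables)
def pvD2L : PySem.Dict Char Char :=
  PySem.Dict.ofList [('0','O'),('1','I'),('2','Z'),('4','A'),('5','S'),('6','G'),('8','B')]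
def pvL2D : PySem.Dict Char Char :=
  PySem.Dict.ofList [('O','0'),('I','1'),('Z','2'),('A','4'),('S','5'),('G','6'),('B','8')]

-- ===== PORT A =====
-- 'for i, c in enumerate(text): if <p c> and i >= 1: split = i; break' (both loops share this shape)
def pvFindIdx (p : Char → Bool) : List (Int × Char) → Option Int
  | [] => none
  | (i, c) :: rest => if p c = true ∧ 1 ≤ i then some i else pvFindIdx p rest

def normalize_plate (text : String) : String :=
  let t := PySem.Str.upper (PySem.Str.replace text " " "")
  let cs := t.toList
  if cs = [] then t
  else
    let n : Int := cs.length
    -- split = len(text); first loop (break = first hit), sentinel stays n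
    let split0 : Int := (pvFindIdx PySem.Chars.isdigit (PySem.List.enumerate cs 0)).getD n
    -- if split == len(text): second loop
    let split1 : Int :=
      if split0 = n then (pvFindIdx (fun c => pvL2D.contains c) (PySem.List.enumerate cs 0)).getD n
      else split0
    -- split = max(1, min(2, split))
    let split : Int := max 1 (min 2 split1)
    -- result loop over enumerate, appending; ''.join of 1-char strings
    String.ofList ((PySem.List.enumerate cs 0).foldl
      (fun acc (p : Int × Char) =>
        acc ++ [if p.1 < split then pvD2L.getD p.2 p.2 else pvL2D.getD p.2 p.2]) [])

-- ===== PORT B =====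
def normalize_plate_alt (text : String) : String :=
  let t := PySem.Str.upper (PySem.Str.replace text " " "")
  match t.toList with
  | [] => t
  | [c0] => String.ofList [pvD2L.getD c0 c0]
  | c0 :: c1 :: rest =>
    let head := pvD2L.getD c0 c0
    let mid := if pvL2D.contains c1 && !(rest.any PySem.Chars.isdigit)
               then pvL2D.getD c1 c1 else c1
    let tail := rest.map (fun c => pvL2D.getD c c)
    String.ofList (head :: mid :: tail)

-- ===== PRECONDITION & SPEC =====
def Spec_normalize_plate (text : String) (out : String) : Prop := out = normalize_plate_alt text
instance (text : String) (out : String) : Decidable (Spec_normalize_plate text out) := by unfold Spec_normalize_plate; infer_instance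

-- ===== CLAIM (what is proved, stated in full; the proofs are below) =====
def Claim_equal_normalize_plate : Prop := ∀ (text : String), Dom_normalize_plate text → Spec_normalize_plate text (normalize_plate text)

-- ===== LEMMAS AND PROOFS =====

theorem pvFoldl_snoc (f : Int × Char → Char) :
    ∀ (xs : List (Int × Char)) (init : List Char),
      xs.foldl (fun acc p => acc ++ [f p]) init = init ++ xs.map f := by
  intro xs
  induction xs with
  | nil => simp
  | cons x xs ih => intro init; simp [List.foldl_cons, ih]

theorem pvEnumMap (f g : Char → Char) :
    ∀ (cs : List Char) (start s : Int),
      (PySem.List.enumerate cs start).map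
          (fun p => if p.1 < s then f p.2 else g p.2)
        = (cs.take (s - start).toNat).map f ++ (cs.drop (s - start).toNat).map g := by
  intro cs
  induction cs with
  | nil => simp
  | cons c cs ih =>
    intro start s
    rw [PySem.List.enumerate_cons]
    by_cases h : start < s
    · have hk : (s - start).toNat = (s - (start + 1)).toNat + 1 := by omega
      simp only [List.map_cons, hk, List.take_succ_cons, List.drop_succ_cons, if_pos h,
        List.map_cons, ih]
      simp
    · have hk : (s - start).toNat = 0 := by omega
      have hk' : (s - (start + 1)).toNat = 0 := by omega
      simp only [List.map_cons, hk, if_neg h, ih (start + 1) s, hk', List.take_zero,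
        List.drop_zero, List.map_nil, List.nil_append]

theorem pvFind_none (p : Char → Bool) :
    ∀ (l : List Char) (start : Int), (∀ c ∈ l, p c = false) →
      pvFindIdx p (PySem.List.enumerate l start) = none := by
  intro l
  induction l with
  | nil => intro start _; simp [PySem.List.enumerate_nil, pvFindIdx]
  | cons c l ih =>
    intro start h
    rw [PySem.List.enumerate_cons]
    have := h c (by simp)
    simp [pvFindIdx, this, ih (start + 1) (fun c hc => h c (by simp [hc]))]

theorem pvFind_some_bounds (p : Char → Bool) :
    ∀ (l : List Char) (start : Int) (i : Int),
      pvFindIdx p (PySem.List.enumerate l start) = some i →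
      i < start + l.length ∧ (1 ≤ start → start ≤ i) := by
  intro l
  induction l with
  | nil => intro start i h; simp [PySem.List.enumerate_nil, pvFindIdx] at h
  | cons c l ih =>
    intro start i h
    rw [PySem.List.enumerate_cons] at h
    simp only [pvFindIdx] at h
    split at h
    · cases h
      simp only [List.length_cons]
      omega
    · have := ih (start + 1) i h
      simp only [List.length_cons]
      omega

theorem pvFind_isSome (p : Char → Bool) :
    ∀ (l : List Char) (start : Int), 1 ≤ start → (∃ c ∈ l, p c = true) →
      (pvFindIdx p (PySem.List.enumerate l start)).isSome = true := by
  intro l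
  induction l with
  | nil => simp
  | cons c l ih =>
    intro start hs h
    rw [PySem.List.enumerate_cons]
    simp only [pvFindIdx]
    split
    · simp
    · rename_i hcond
      rcases h with ⟨d, hd, hp⟩
      rcases List.mem_cons.mp hd with rfl | hd'
      · exact absurd ⟨hp, hs⟩ hcond
      · exact ih (start + 1) (by omega) ⟨d, hd', hp⟩

theorem pvFindIdx_skip0 (p : Char → Bool) (c : Char) (rest : List (Int × Char)) :
    pvFindIdx p ((0, c) :: rest) = pvFindIdx p rest := by
  simp [pvFindIdx]

theorem pvFindIdx_hit (p : Char → Bool) (c : Char) (rest : List (Int × Char)) (i : Int)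
    (h : p c = true) (hi : 1 ≤ i) : pvFindIdx p ((i, c) :: rest) = some i := by
  simp [pvFindIdx, h, hi]

theorem pvFindIdx_miss (p : Char → Bool) (c : Char) (rest : List (Int × Char)) (i : Int)
    (h : p c = false) : pvFindIdx p ((i, c) :: rest) = pvFindIdx p rest := by
  simp [pvFindIdx, h]

-- A's result-building loop equals take/drop slice maps, for any split value s
theorem pvResultEq (cs : List Char) (s : Int) :
    (PySem.List.enumerate cs 0).foldl
        (fun acc (p : Int × Char) =>
          acc ++ [if p.1 < s then pvD2L.getD p.2 p.2 else pvL2D.getD p.2 p.2]) []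
      = ((cs.take s.toNat).map fun c => pvD2L.getD c c)
        ++ ((cs.drop s.toNat).map fun c => pvL2D.getD c c) := by
  rw [pvFoldl_snoc (fun p : Int × Char => if p.1 < s then pvD2L.getD p.2 p.2 else pvL2D.getD p.2 p.2)]
  have := pvEnumMap (fun c => pvD2L.getD c c) (fun c => pvL2D.getD c c) cs 0 s
  simpa using this

-- a digit char is not a key of pvL2D, hence L2D leaves it unchanged
theorem pvL2D_digit (c : Char) (h : PySem.Chars.isdigit c = true) :
    pvL2D.getD c c = c ∧ pvL2D.contains c = false := by
  simp [PySem.Chars.isdigit, Char.le_def] at h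
  have h1 : ('O' == c) = false := by rw [beq_eq_false_iff_ne]; rintro rfl; revert h; decide
  have h2 : ('I' == c) = false := by rw [beq_eq_false_iff_ne]; rintro rfl; revert h; decide
  have h3 : ('Z' == c) = false := by rw [beq_eq_false_iff_ne]; rintro rfl; revert h; decide
  have h4 : ('A' == c) = false := by rw [beq_eq_false_iff_ne]; rintro rfl; revert h; decide
  have h5 : ('S' == c) = false := by rw [beq_eq_false_iff_ne]; rintro rfl; revert h; decide
  have h6 : ('G' == c) = false := by rw [beq_eq_false_iff_ne]; rintro rfl; revert h; decide
  have h7 : ('B' == c) = false := by rw [beq_eq_false_iff_ne]; rintro rfl; revert h; decide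
  have hL : pvL2D = PySem.Dict.mk [('O','0'),('I','1'),('Z','2'),('A','4'),('S','5'),('G','6'),('B','8')] := rfl
  rw [hL]
  constructor <;>
    simp [PySem.Dict.getD_eq_get?_getD, PySem.Dict.contains_mk, PySem.Dict.get?,
      h1, h2, h3, h4, h5, h6, h7]

-- a non-digit char is not a key of pvD2L, hence D2L leaves it unchanged
theorem pvD2L_nondigit (c : Char) (h : PySem.Chars.isdigit c = false) :
    pvD2L.getD c c = c := by
  simp [PySem.Chars.isdigit, Char.le_def] at h
  have h1 : ('0' == c) = false := by rw [beq_eq_false_iff_ne]; rintro rfl; revert h; decide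
  have h2 : ('1' == c) = false := by rw [beq_eq_false_iff_ne]; rintro rfl; revert h; decide
  have h3 : ('2' == c) = false := by rw [beq_eq_false_iff_ne]; rintro rfl; revert h; decide
  have h4 : ('4' == c) = false := by rw [beq_eq_false_iff_ne]; rintro rfl; revert h; decide
  have h5 : ('5' == c) = false := by rw [beq_eq_false_iff_ne]; rintro rfl; revert h; decide
  have h6 : ('6' == c) = false := by rw [beq_eq_false_iff_ne]; rintro rfl; revert h; decide
  have h7 : ('8' == c) = false := by rw [beq_eq_false_iff_ne]; rintro rfl; revert h; decide
  have hD : pvD2L = PySem.Dict.mk [('0','O'),('1','I'),('2','Z'),('4','A'),('5','S'),('6','G'),('8','B')] := rfl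
  rw [hD]
  simp [PySem.Dict.getD_eq_get?_getD, PySem.Dict.get?, h1, h2, h3, h4, h5, h6, h7]

-- ===== VERDICT (by name: the statement is the Claim_ definition above) =====
theorem normalize_plate_spec : Claim_equal_normalize_plate := by
  intro text _
  unfold Spec_normalize_plate normalize_plate normalize_plate_alt
  cases h : (PySem.Str.upper (PySem.Str.replace text " " "")).toList with
  | nil => simp [h]
  | cons c0 rest0 =>
    simp only [h]
    rw [if_neg (by simp), pvResultEq]
    cases rest0 with
    | nil =>
      norm_num [PySem.List.enumerate_cons, PySem.List.enumerate_nil, pvFindIdx]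
    | cons c1 rest =>
      have henum : PySem.List.enumerate (c0 :: c1 :: rest) 0
          = (0, c0) :: (1, c1) :: PySem.List.enumerate rest 2 := by
        rw [PySem.List.enumerate_cons, PySem.List.enumerate_cons]
        norm_num
      rw [henum, pvFindIdx_skip0, pvFindIdx_skip0]
      by_cases hd : PySem.Chars.isdigit c1 = true
      · -- split = 1; at index 1 A applies L2D to a digit: unchanged; B's mid = c1
        rw [pvFindIdx_hit _ _ _ _ hd (by norm_num)]
        have hne : (1 : Int) ≠ ((c0 :: c1 :: rest).length : Int) := by
          simp only [List.length_cons]; push_cast; omega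
        simp only [Option.getD_some]
        rw [if_neg hne]
        have h1 : max 1 (min 2 (1 : Int)) = 1 := by omega
        rw [h1]
        obtain ⟨hg, hc⟩ := pvL2D_digit c1 hd
        simp [hc, hg]
      · rw [pvFindIdx_miss _ _ _ _ (by simpa using hd)]
        by_cases ha : rest.any PySem.Chars.isdigit = true
        · -- split = 2; at index 1 A applies D2L to a non-digit: unchanged; B's mid = c1
          have hsome := pvFind_isSome PySem.Chars.isdigit rest 2 (by norm_num)
            (by simpa [List.any_eq_true] using ha)
          obtain ⟨i, hi⟩ := Option.isSome_iff_exists.mp hsome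
          have hb := pvFind_some_bounds PySem.Chars.isdigit rest 2 i hi
          rw [hi]
          simp only [Option.getD_some]
          have hne : i ≠ ((c0 :: c1 :: rest).length : Int) := by
            simp only [List.length_cons]; push_cast; omega
          rw [if_neg hne]
          have h2 : max 1 (min 2 i) = 2 := by omega
          rw [h2]
          simp [ha, pvD2L_nondigit c1 (by simpa using hd)]
        · have hnone := pvFind_none PySem.Chars.isdigit rest 2
            (by intro c hc; simpa using (List.any_eq_false.mp (by simpa using ha)) c hc)
          rw [hnone]
          simp only [Option.getD_none]
          simp only [if_true]
          by_cases hc : pvL2D.contains c1 = true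
          · -- split = 1; both map index 1 through L2D
            rw [pvFindIdx_hit _ _ _ _ hc (by norm_num)]
            simp only [Option.getD_some]
            have h1 : max 1 (min 2 (1 : Int)) = 1 := by omega
            rw [h1]
            simp [hc, ha]
          · -- split = 2; at index 1 A applies D2L to a non-digit: unchanged; B's mid = c1
            rw [pvFindIdx_miss _ _ _ _ (by simpa using hc)]
            have h2 : max 1 (min 2 ((pvFindIdx (fun c => pvL2D.contains c)
                (PySem.List.enumerate rest 2)).getD ((c0 :: c1 :: rest).length : Int))) = 2 := by
              cases hopt : pvFindIdx (fun c => pvL2D.contains c) (PySem.List.enumerate rest 2) with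
              | none =>
                simp only [Option.getD_none, List.length_cons]
                push_cast; omega
              | some i =>
                have hb := pvFind_some_bounds (fun c => pvL2D.contains c) rest 2 i hopt
                simp only [Option.getD_some]
                omega
            rw [h2]
            simp [hc, pvD2L_nondigit c1 (by simpa using hd)]
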